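-- pv_equiv track=rewrite | github.com/juampileiva/Juan_Pablo_Leiva_Final | final/examen.py | buscar_secuencia_mas_corta_y_larga
-- ===== SOURCE A (Python) =====
-- def buscar_secuencia_mas_corta_y_larga(matriz: list[list], numero: int) -> tuple:
--     """Busca las secuencias de números consecutivos que sumen el número ingresado y determina cuál es la más corta y la más larga
--
--     Args:
--         matriz (list[list]): Matriz que contiene los números
--         numero (int): Número a buscar mediante sumas de secuencias
--
--     Returns:
--         tuple: Mensajes que indican la secuencia más corta y la más larga
--     """
--     secuencias_encontradas = []
--
--     # Buscar en filas
--     for fila in matriz: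
--         for i in range(len(fila)):
--             for j in range(i+2, len(fila)+1):
--                 secuencia = fila[i:j]
--                 if sum(secuencia) == numero:
--                     secuencias_encontradas.append(secuencia)
--
--     # Buscar en columnas
--     for col in range(len(matriz[0])):
--         columna = [fila[col] for fila in matriz]
--         for i in range(len(columna)):
--             for j in range(i+2, len(columna)+1):
--                 secuencia = columna[i:j]
--                 if sum(secuencia) == numero:
--                     secuencias_encontradas.append(secuencia)
--
--     if secuencias_encontradas:
--         secuencia_mas_corta = min(secuencias_encontradas, key=len)
--         secuencia_mas_larga = max(secuencias_encontradas, key=len)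
--         mensaje_corta = f"La secuencia más corta que suma {numero} tiene {len(secuencia_mas_corta)} elementos: {secuencia_mas_corta}"
--         mensaje_larga = f"La secuencia más larga que suma {numero} tiene {len(secuencia_mas_larga)} elementos: {secuencia_mas_larga}"
--         return mensaje_corta, mensaje_larga
--     else:
--         return f"No se encontraron secuencias que sumen {numero}", f"No se encontraron secuencias que sumen {numero}"
-- ===== SOURCE B (Python) =====
-- def buscar_secuencia_mas_corta_y_larga(matriz: list[list], numero: int) -> tuple:
--     """Re-implementation with per-line prefix sums and streaming shortest/longest tracking."""
--     lines = list(matriz)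
--     for col in range(len(matriz[0])):
--         lines.append([fila[col] for fila in matriz])
--
--     mas_corta = None
--     mas_larga = None
--     for line in lines:
--         n = len(line)
--         pref = [0] * (n + 1)
--         s = 0
--         for k in range(n):
--             s += line[k]
--             pref[k + 1] = s
--         for i in range(n):
--             for j in range(i + 2, n + 1):
--                 if pref[j] - pref[i] == numero:
--                     if mas_corta is None or j - i < len(mas_corta):
--                         mas_corta = line[i:j]
--                     if mas_larga is None or j - i > len(mas_larga):
--                         mas_larga = line[i:j]
--
--     if mas_corta is None:
--         msg = f"No se encontraron secuencias que sumen {numero}"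
--         return msg, msg
--     return (f"La secuencia más corta que suma {numero} tiene {len(mas_corta)} elementos: {mas_corta}",
--             f"La secuencia más larga que suma {numero} tiene {len(mas_larga)} elementos: {mas_larga}")
-- ===== Notes on version B (the rewrite author's own statement) =====
-- stated objective: faster
-- what changed: A collects every matching slice (summing each slice from scratch) into a list and then takes min/max by length; B computes per-line prefix sums so each window sum is O(1) and tracks the first shortest and first longest match in a single streaming pass, never materialising the candidate list.
import Mathlib
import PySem

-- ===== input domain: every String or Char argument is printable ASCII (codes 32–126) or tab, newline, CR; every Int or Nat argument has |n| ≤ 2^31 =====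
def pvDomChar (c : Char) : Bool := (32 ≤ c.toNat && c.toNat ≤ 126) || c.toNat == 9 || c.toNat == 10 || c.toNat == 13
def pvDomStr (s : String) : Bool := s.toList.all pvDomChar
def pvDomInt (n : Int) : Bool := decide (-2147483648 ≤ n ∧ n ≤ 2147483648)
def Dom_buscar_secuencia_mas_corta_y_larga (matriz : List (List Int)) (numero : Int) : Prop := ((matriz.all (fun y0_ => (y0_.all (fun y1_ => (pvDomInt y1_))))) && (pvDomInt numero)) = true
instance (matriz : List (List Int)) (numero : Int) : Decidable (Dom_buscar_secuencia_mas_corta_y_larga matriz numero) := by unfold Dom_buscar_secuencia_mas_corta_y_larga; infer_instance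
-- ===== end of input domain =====

-- B replaces A's collect-every-matching-slice-then-min/max (summing each slice afresh) by
-- per-line prefix sums with streaming first-shortest/first-longest tracking; objective: faster.

-- shared message formatting (Python f-strings; used identically by both programs)
def pvRepr (xs : List Int) : String := "[" ++ String.intercalate ", " (xs.map PySem.Int.toStr) ++ "]"
def pvMsgNone (numero : Int) : String := "No se encontraron secuencias que sumen " ++ PySem.Int.toStr numero
def pvMsgCorta (numero : Int) (s : List Int) : String :=
  "La secuencia más corta que suma " ++ PySem.Int.toStr numero ++ " tiene " ++ PySem.Int.toStr (s.length : Int) ++ " elementos: " ++ pvRepr s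
def pvMsgLarga (numero : Int) (s : List Int) : String :=
  "La secuencia más larga que suma " ++ PySem.Int.toStr numero ++ " tiene " ++ PySem.Int.toStr (s.length : Int) ++ " elementos: " ++ pvRepr s

-- ===== PORT A =====
-- the double loop 'for i in range(len(fila)): for j in range(i+2, len(fila)+1): if sum(fila[i:j]) == numero: append'
def pvScanLine (numero : Int) (acc : List (List Int)) (line : List Int) : List (List Int) :=
  (PySem.List.pyRange 0 (line.length : Int) 1).foldl (fun acc1 i =>
    (PySem.List.pyRange (i + 2) ((line.length : Int) + 1) 1).foldl (fun acc2 j =>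
      if (PySem.List.slice line (some i) (some j)).sum = numero
      then acc2 ++ [PySem.List.slice line (some i) (some j)] else acc2) acc1) acc

def buscar_secuencia_mas_corta_y_larga (matriz : List (List Int)) (numero : Int) : String × String :=
  let s1 := matriz.foldl (pvScanLine numero) []
  let secuencias := (PySem.List.pyRange 0 (((matriz.headD []).length : Int)) 1).foldl
      (fun acc col => pvScanLine numero acc (matriz.map (fun fila => (PySem.List.pyGet? fila col).getD 0))) s1
  if secuencias ≠ [] then
    let corta := (PySem.List.min? secuencias (fun s => s.length)).getD []
    let larga := (PySem.List.max? secuencias (fun s => s.length)).getD []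
    (pvMsgCorta numero corta, pvMsgLarga numero larga)
  else (pvMsgNone numero, pvMsgNone numero)

-- ===== PORT B =====
-- pref = [0]; s = 0; for x in line: s += x; pref.append(s)
def pvPrefix (line : List Int) : List Int :=
  (line.foldl (fun (st : Int × List Int) x => (st.1 + x, st.2 ++ [st.1 + x])) (0, [0])).2

-- 'if mas_corta is None or j - i < len(mas_corta): mas_corta = line[i:j]'
def pvShortUpd (b : Option (List Int)) (line : List Int) (i j : Int) : Option (List Int) :=
  match b with
  | none => some (PySem.List.slice line (some i) (some j))
  | some m => if j - i < (m.length : Int) then some (PySem.List.slice line (some i) (some j)) else some m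

def pvLongUpd (b : Option (List Int)) (line : List Int) (i j : Int) : Option (List Int) :=
  match b with
  | none => some (PySem.List.slice line (some i) (some j))
  | some m => if (m.length : Int) < j - i then some (PySem.List.slice line (some i) (some j)) else some m

def pvLineBest (numero : Int) (st : Option (List Int) × Option (List Int)) (line : List Int) :
    Option (List Int) × Option (List Int) :=
  let pref := pvPrefix line
  (PySem.List.pyRange 0 (line.length : Int) 1).foldl (fun st1 i =>
    (PySem.List.pyRange (i + 2) ((line.length : Int) + 1) 1).foldl (fun st2 j =>
      if PySem.List.pyGetD pref j 0 - PySem.List.pyGetD pref i 0 = numero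
      then (pvShortUpd st2.1 line i j, pvLongUpd st2.2 line i j) else st2) st1) st

def buscar_secuencia_mas_corta_y_larga_alt (matriz : List (List Int)) (numero : Int) : String × String :=
  let lines := (PySem.List.pyRange 0 (((matriz.headD []).length : Int)) 1).foldl
      (fun ls col => ls ++ [matriz.map (fun fila => (PySem.List.pyGet? fila col).getD 0)]) matriz
  match lines.foldl (pvLineBest numero) (none, none) with
  | (some c, some l) => (pvMsgCorta numero c, pvMsgLarga numero l)
  | _ => (pvMsgNone numero, pvMsgNone numero)

-- ===== PRECONDITION & SPEC =====
-- Pre_ excludes exactly the inputs where Python A raises IndexError: an empty matriz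
-- (matriz[0]) or a row shorter than the first row (fila[col] in the column comprehension).
def Pre_buscar_secuencia_mas_corta_y_larga (matriz : List (List Int)) (numero : Int) : Prop :=
  matriz ≠ [] ∧ ∀ fila ∈ matriz, (matriz.headD []).length ≤ fila.length
instance (matriz : List (List Int)) (numero : Int) : Decidable (Pre_buscar_secuencia_mas_corta_y_larga matriz numero) := by unfold Pre_buscar_secuencia_mas_corta_y_larga; infer_instance

def pvWitness_buscar_secuencia_mas_corta_y_larga : List (List Int) × Int := ([[1, 2], [3, 4]], 3)

def Spec_buscar_secuencia_mas_corta_y_larga (matriz : List (List Int)) (numero : Int) (out : String × String) : Prop := out = buscar_secuencia_mas_corta_y_larga_alt matriz numero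
instance (matriz : List (List Int)) (numero : Int) (out : String × String) : Decidable (Spec_buscar_secuencia_mas_corta_y_larga matriz numero out) := by unfold Spec_buscar_secuencia_mas_corta_y_larga; infer_instance

-- ===== CLAIM (what is proved, stated in full; the proofs are below) =====
def Claim_equal_buscar_secuencia_mas_corta_y_larga : Prop := ∀ (matriz : List (List Int)) (numero : Int), Dom_buscar_secuencia_mas_corta_y_larga matriz numero → Pre_buscar_secuencia_mas_corta_y_larga matriz numero → Spec_buscar_secuencia_mas_corta_y_larga matriz numero (buscar_secuencia_mas_corta_y_larga matriz numero)

-- ===== LEMMAS AND PROOFS =====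

-- the list of matching sequences A collects for one line, in A's iteration order
def pvMatches (numero : Int) (line : List Int) : List (List Int) :=
  (PySem.List.pyRange 0 (line.length : Int) 1).flatMap (fun i =>
    ((PySem.List.pyRange (i + 2) ((line.length : Int) + 1) 1).filter
        (fun j => decide ((PySem.List.slice line (some i) (some j)).sum = numero))).map
      (fun j => PySem.List.slice line (some i) (some j)))

-- min?/max?'s own step functions, and the combined one B maintains
def pvMinStep (b : Option (List Int)) (seq : List Int) : Option (List Int) :=
  match b with | none => some seq | some m => if seq.length < m.length then some seq else some m
def pvMaxStep (b : Option (List Int)) (seq : List Int) : Option (List Int) :=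
  match b with | none => some seq | some m => if m.length < seq.length then some seq else some m
def pvStepSeq (st : Option (List Int) × Option (List Int)) (seq : List Int) :
    Option (List Int) × Option (List Int) := (pvMinStep st.1 seq, pvMaxStep st.2 seq)

theorem pv_foldl_if_filter_map {α β γ : Type} (p : β → Prop) [DecidablePred p] (f : β → γ)
    (g : α → γ → α) (l : List β) : ∀ (s : α),
    l.foldl (fun s x => if p x then g s (f x) else s) s
      = ((l.filter (fun x => decide (p x))).map f).foldl g s := by
  induction l with
  | nil => intro s; rfl
  | cons x t ih =>
      intro s
      by_cases h : p x <;> simp [h, ih]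

theorem pvPrefix_foldl (l : List Int) : ∀ (s : Int) (P : List Int),
    (l.foldl (fun (st : Int × List Int) x => (st.1 + x, st.2 ++ [st.1 + x])) (s, P)).2
      = P ++ (List.range l.length).map (fun k => s + (l.take (k + 1)).sum) := by
  induction l with
  | nil => intro s P; simp
  | cons x t ih =>
      intro s P
      simp only [List.foldl_cons, ih, List.length_cons, List.range_succ_eq_map,
        List.map_cons, List.map_map]
      simp [Function.comp_def, add_assoc]

theorem pvPrefix_eq (line : List Int) :
    pvPrefix line = (List.range (line.length + 1)).map (fun k => (line.take k).sum) := by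
  unfold pvPrefix
  rw [pvPrefix_foldl]
  simp [List.range_succ_eq_map, List.map_map, Function.comp_def]

theorem pvPrefix_get (line : List Int) (j : Int) (h0 : 0 ≤ j) (hj : j ≤ (line.length : Int)) :
    PySem.List.pyGetD (pvPrefix line) j 0 = (line.take j.toNat).sum := by
  rw [pvPrefix_eq]
  rw [PySem.List.pyGetD_of_nonneg _ 0 h0]
  have hj' : j.toNat < line.length + 1 := by omega
  simp [List.getD_eq_getElem?_getD, hj']

theorem pv_slice_len (line : List Int) (i j : Int) (h0 : 0 ≤ i) (hij : i ≤ j)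
    (hj : j ≤ (line.length : Int)) :
    ((PySem.List.slice line (some i) (some j)).length : Int) = j - i := by
  rw [PySem.List.slice_toNat line h0 (le_trans h0 hij)]
  simp
  omega

theorem pv_slice_sum (line : List Int) (i j : Int) (h0 : 0 ≤ i) (hij : i ≤ j)
    (hj : j ≤ (line.length : Int)) :
    (PySem.List.slice line (some i) (some j)).sum
      = (line.take j.toNat).sum - (line.take i.toNat).sum := by
  rw [PySem.List.slice_toNat line h0 (le_trans h0 hij)]
  have h : j.toNat = i.toNat + (j.toNat - i.toNat) := by omega
  have := List.sum_append (l₁ := line.take i.toNat)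
    (l₂ := (line.drop i.toNat).take (j.toNat - i.toNat))
  rw [← List.take_add, ← h] at this
  omega

theorem pvLineBest_eq (numero : Int) (line : List Int) : ∀ st,
    pvLineBest numero st line = (pvMatches numero line).foldl pvStepSeq st := by
  intro st
  unfold pvLineBest pvMatches
  rw [List.flatMap, List.foldl_flatten, List.foldl_map]
  apply PySem.List.foldl_congr_mem'
  intro i hi st1
  have hi' : 0 ≤ i ∧ i < (line.length : Int) := by
    simpa using (PySem.List.mem_pyRange_one.mp hi)
  rw [← pv_foldl_if_filter_map (fun j => (PySem.List.slice line (some i) (some j)).sum = numero)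
        (fun j => PySem.List.slice line (some i) (some j)) pvStepSeq]
  apply PySem.List.foldl_congr_mem'
  intro j hj st2
  have hj' : i + 2 ≤ j ∧ j < (line.length : Int) + 1 := by
    simpa using (PySem.List.mem_pyRange_one.mp hj)
  have hij : i ≤ j := by omega
  have hjn : j ≤ (line.length : Int) := by omega
  have hcond : (PySem.List.pyGetD (pvPrefix line) j 0 - PySem.List.pyGetD (pvPrefix line) i 0 = numero)
      ↔ ((PySem.List.slice line (some i) (some j)).sum = numero) := by
    rw [pvPrefix_get line j (by omega) hjn, pvPrefix_get line i hi'.1 (by omega),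
      pv_slice_sum line i j hi'.1 hij hjn]
  have hlen := pv_slice_len line i j hi'.1 hij hjn
  have hshort : ∀ b, pvShortUpd b line i j = pvMinStep b (PySem.List.slice line (some i) (some j)) := by
    intro b
    cases b with
    | none => rfl
    | some m =>
        simp only [pvShortUpd, pvMinStep]
        have hiff : (j - i < (m.length : Int)) ↔ ((PySem.List.slice line (some i) (some j)).length < m.length) := by omega
        rw [if_congr hiff rfl rfl]
  have hlong : ∀ b, pvLongUpd b line i j = pvMaxStep b (PySem.List.slice line (some i) (some j)) := by
    intro b
    cases b with
    | none => rfl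
    | some m =>
        simp only [pvLongUpd, pvMaxStep]
        have hiff : ((m.length : Int) < j - i) ↔ (m.length < (PySem.List.slice line (some i) (some j)).length) := by omega
        rw [if_congr hiff rfl rfl]
  have hupd : (pvShortUpd st2.1 line i j, pvLongUpd st2.2 line i j)
      = pvStepSeq st2 (PySem.List.slice line (some i) (some j)) := by
    rw [pvStepSeq, hshort, hlong]
  rw [if_congr hcond hupd rfl]

theorem pvScanLine_eq (numero : Int) (line : List Int) : ∀ acc,
    pvScanLine numero acc line = acc ++ pvMatches numero line := by
  intro acc
  unfold pvScanLine pvMatches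
  have hbody : ∀ i ∈ PySem.List.pyRange 0 (line.length : Int) 1, ∀ (acc1 : List (List Int)),
      (PySem.List.pyRange (i + 2) ((line.length : Int) + 1) 1).foldl (fun acc2 j =>
          if (PySem.List.slice line (some i) (some j)).sum = numero
          then acc2 ++ [PySem.List.slice line (some i) (some j)] else acc2) acc1
        = acc1 ++ ((PySem.List.pyRange (i + 2) ((line.length : Int) + 1) 1).filter
            (fun j => decide ((PySem.List.slice line (some i) (some j)).sum = numero))).map
            (fun j => PySem.List.slice line (some i) (some j)) := by
    intro i _ acc1
    rw [pv_foldl_if_filter_map (fun j => (PySem.List.slice line (some i) (some j)).sum = numero)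
        (fun j => PySem.List.slice line (some i) (some j)) (fun acc x => acc ++ [x])]
    exact PySem.List.foldl_append_singleton _ _
  rw [PySem.List.foldl_congr_mem' _ _ _ _ hbody]
  exact PySem.List.foldl_append_eq_flatMap _ _ _

theorem pv_pairfold (cs : List (List Int)) : ∀ (st : Option (List Int) × Option (List Int)),
    cs.foldl pvStepSeq st = (cs.foldl pvMinStep st.1, cs.foldl pvMaxStep st.2) := by
  induction cs with
  | nil => intro st; rfl
  | cons x t ih => intro st; simp [List.foldl_cons, ih, pvStepSeq]

theorem pv_minfold (cs : List (List Int)) :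
    cs.foldl pvMinStep none = PySem.List.min? cs (fun s => s.length) := by
  unfold PySem.List.min?
  exact PySem.List.foldl_congr_mem' _ _ _ _ (by intro x _ acc; cases acc <;> rfl)
theorem pv_maxfold (cs : List (List Int)) :
    cs.foldl pvMaxStep none = PySem.List.max? cs (fun s => s.length) := by
  unfold PySem.List.max?
  exact PySem.List.foldl_congr_mem' _ _ _ _ (by intro x _ acc; cases acc <;> rfl)

-- both programs visit the same lines: the rows, then the columns
def pvLines (matriz : List (List Int)) : List (List Int) :=
  matriz ++ (PySem.List.pyRange 0 (((matriz.headD []).length : Int)) 1).map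
    (fun col => matriz.map (fun fila => (PySem.List.pyGet? fila col).getD 0))

theorem pvA_secuencias (matriz : List (List Int)) (numero : Int) :
    (PySem.List.pyRange 0 (((matriz.headD []).length : Int)) 1).foldl
        (fun acc col => pvScanLine numero acc (matriz.map (fun fila => (PySem.List.pyGet? fila col).getD 0)))
        (matriz.foldl (pvScanLine numero) [])
      = (pvLines matriz).flatMap (pvMatches numero) := by
  have h1 : matriz.foldl (pvScanLine numero) [] = matriz.flatMap (pvMatches numero) := by
    rw [PySem.List.foldl_congr_mem' _ _ (fun acc l => acc ++ pvMatches numero l) _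
      (by intro l _ acc; exact pvScanLine_eq numero l acc)]
    exact (PySem.List.foldl_append_eq_flatMap (pvMatches numero) matriz []).trans (List.nil_append _)
  rw [PySem.List.foldl_congr_mem' _ _
      (fun acc col => acc ++ pvMatches numero (matriz.map (fun fila => (PySem.List.pyGet? fila col).getD 0))) _
      (by intro col _ acc; exact pvScanLine_eq numero _ acc), h1,
    PySem.List.foldl_append_eq_flatMap]
  unfold pvLines
  rw [List.flatMap_append, List.flatMap_map]

theorem pvB_lines (matriz : List (List Int)) :
    (PySem.List.pyRange 0 (((matriz.headD []).length : Int)) 1).foldl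
        (fun ls col => ls ++ [matriz.map (fun fila => (PySem.List.pyGet? fila col).getD 0)]) matriz
      = pvLines matriz := by
  exact PySem.List.foldl_append_singleton_eq_map _ _ _

theorem pvB_best (matriz : List (List Int)) (numero : Int) :
    (pvLines matriz).foldl (pvLineBest numero) (none, none)
      = (PySem.List.min? ((pvLines matriz).flatMap (pvMatches numero)) (fun s => s.length),
         PySem.List.max? ((pvLines matriz).flatMap (pvMatches numero)) (fun s => s.length)) := by
  rw [PySem.List.foldl_congr_mem' _ _ (fun st line => (pvMatches numero line).foldl pvStepSeq st) _
    (by intro line _ st; exact pvLineBest_eq numero line st)]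
  have h : ∀ (L : List (List Int)) (st : Option (List Int) × Option (List Int)),
      L.foldl (fun st line => (pvMatches numero line).foldl pvStepSeq st) st
        = (L.flatMap (pvMatches numero)).foldl pvStepSeq st := by
    intro L
    induction L with
    | nil => intro st; rfl
    | cons x t ih => intro st; simp [List.foldl_cons, List.flatMap_cons, List.foldl_append, ih]
  rw [h, pv_pairfold, pv_minfold, pv_maxfold]

-- ===== VERDICT (by name: the statement is the Claim_ definition above) =====
theorem buscar_secuencia_mas_corta_y_larga_spec : Claim_equal_buscar_secuencia_mas_corta_y_larga := by
  intro matriz numero _ _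
  unfold Spec_buscar_secuencia_mas_corta_y_larga
  unfold buscar_secuencia_mas_corta_y_larga buscar_secuencia_mas_corta_y_larga_alt
  dsimp only
  rw [pvA_secuencias, pvB_lines, pvB_best]
  set S := (pvLines matriz).flatMap (pvMatches numero) with hS
  by_cases h : S = []
  · rw [h, if_neg (by simp)]
    rfl
  · rw [if_pos h]
    obtain ⟨c, hc⟩ : ∃ c, PySem.List.min? S (fun s => s.length) = some c := by
      cases hmin : PySem.List.min? S (fun s => s.length) with
      | none => exact absurd ((PySem.List.min?_eq_none_iff S (fun s => s.length)).mp hmin) h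
      | some c => exact ⟨c, rfl⟩
    obtain ⟨l, hl⟩ : ∃ l, PySem.List.max? S (fun s => s.length) = some l := by
      cases hmax : PySem.List.max? S (fun s => s.length) with
      | none => exact absurd ((PySem.List.max?_eq_none_iff S (fun s => s.length)).mp hmax) h
      | some l => exact ⟨l, rfl⟩
    rw [hc, hl]
    rfl
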